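-- pv_equiv track=rewrite | github.com/meowraii/haze-weather-radio | managed/packages.py | _detect_alert_source
-- ===== SOURCE A (Python) =====
-- from typing import Any, ClassVar, Optional, cast
--
-- def _detect_alert_source(params: list[dict[str, Any]], sender_name: str) -> str:
--     for p in params:
--         if p.get('valueName', '').startswith('layer:EC-MSC-SMC'):
--             return 'eccc'
--     sender_lower = sender_name.lower()
--     if 'weather.gov' in sender_lower or 'national weather service' in sender_lower:
--         return 'nws'
--     for p in params:
--         if p.get('valueName', '').upper() == 'EAS-ORG':
--             return 'nws'
--     return 'civil'
-- ===== SOURCE B (Python) =====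
-- def _detect_alert_source(params: list, sender_name: str) -> str:
--     has_eccc = False
--     has_eas_org = False
--     for p in params:
--         v = p.get('valueName', '')
--         has_eccc = has_eccc or v.startswith('layer:EC-MSC-SMC')
--         has_eas_org = has_eas_org or v.upper() == 'EAS-ORG'
--     if has_eccc:
--         return 'eccc'
--     sender_lower = sender_name.lower()
--     if 'weather.gov' in sender_lower or 'national weather service' in sender_lower:
--         return 'nws'
--     return 'nws' if has_eas_org else 'civil'
-- ===== Notes on version B (the rewrite author's own statement) =====
-- stated objective: alternative
-- what changed: Replaces the two interleaved early-return scans over params with one single pass collecting two booleans (has_eccc, has_eas_org) followed by a flat precedence decision.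
import Mathlib
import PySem

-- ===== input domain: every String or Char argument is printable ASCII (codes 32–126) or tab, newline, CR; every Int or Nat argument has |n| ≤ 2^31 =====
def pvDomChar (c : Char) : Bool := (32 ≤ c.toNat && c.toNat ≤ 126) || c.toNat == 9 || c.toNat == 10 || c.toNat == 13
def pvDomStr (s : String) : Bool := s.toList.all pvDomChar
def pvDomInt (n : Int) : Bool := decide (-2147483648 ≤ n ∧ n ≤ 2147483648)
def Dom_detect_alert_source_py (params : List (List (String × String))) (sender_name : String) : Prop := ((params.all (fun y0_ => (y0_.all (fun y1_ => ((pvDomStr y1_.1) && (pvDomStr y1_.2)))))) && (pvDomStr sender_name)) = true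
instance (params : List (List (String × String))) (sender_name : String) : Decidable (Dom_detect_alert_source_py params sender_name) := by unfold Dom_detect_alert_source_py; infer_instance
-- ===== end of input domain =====

-- B replaces A's two interleaved early-return scans with one collect-all pass plus a flat
-- precedence decision (objective: alternative decomposition, same cost).

-- ===== PORT A =====
-- first early-return loop: any valueName starting with 'layer:EC-MSC-SMC'
def aScanEccc : List (List (String × String)) → Bool
  | [] => false
  | p :: t =>
    if PySem.Str.startswith ((PySem.Dict.mk p).getD "valueName" "") "layer:EC-MSC-SMC" then true
    else aScanEccc t

-- second early-return loop: any valueName.upper() == 'EAS-ORG'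
def aScanEas : List (List (String × String)) → Bool
  | [] => false
  | p :: t =>
    if PySem.Str.upper ((PySem.Dict.mk p).getD "valueName" "") == "EAS-ORG" then true
    else aScanEas t

def detect_alert_source_py (params : List (List (String × String))) (sender_name : String) : String :=
  if aScanEccc params then "eccc"
  else
    let sender_lower := PySem.Str.lower sender_name
    if PySem.Str.isIn "weather.gov" sender_lower || PySem.Str.isIn "national weather service" sender_lower then "nws"
    else if aScanEas params then "nws"
    else "civil"

-- ===== PORT B =====
-- single pass collecting the two booleans (has_eccc, has_eas_org)
def bCollect (params : List (List (String × String))) : Bool × Bool :=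
  params.foldl
    (fun acc p =>
      let v := (PySem.Dict.mk p).getD "valueName" ""
      (acc.1 || PySem.Str.startswith v "layer:EC-MSC-SMC",
       acc.2 || (PySem.Str.upper v == "EAS-ORG")))
    (false, false)

def detect_alert_source_py_alt (params : List (List (String × String))) (sender_name : String) : String :=
  let flags := bCollect params
  if flags.1 then "eccc"
  else
    let sender_lower := PySem.Str.lower sender_name
    if PySem.Str.isIn "weather.gov" sender_lower || PySem.Str.isIn "national weather service" sender_lower then "nws"
    else if flags.2 then "nws"
    else "civil"

-- ===== PRECONDITION & SPEC =====
def Spec_detect_alert_source_py (params : List (List (String × String))) (sender_name : String) (out : String) : Prop := out = detect_alert_source_py_alt params sender_name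
instance (params : List (List (String × String))) (sender_name : String) (out : String) : Decidable (Spec_detect_alert_source_py params sender_name out) := by unfold Spec_detect_alert_source_py; infer_instance

-- ===== CLAIM (what is proved, stated in full; the proofs are below) =====
def Claim_equal_detect_alert_source_py : Prop := ∀ (params : List (List (String × String))) (sender_name : String), Dom_detect_alert_source_py params sender_name → Spec_detect_alert_source_py params sender_name (detect_alert_source_py params sender_name)

-- ===== LEMMAS AND PROOFS =====
theorem bCollect_eq (params : List (List (String × String))) :
    bCollect params = (aScanEccc params, aScanEas params) := by
  have h : ∀ (ps : List (List (String × String))) (a b : Bool),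
      ps.foldl
        (fun acc p =>
          let v := (PySem.Dict.mk p).getD "valueName" ""
          (acc.1 || PySem.Str.startswith v "layer:EC-MSC-SMC",
           acc.2 || (PySem.Str.upper v == "EAS-ORG")))
        (a, b) = (a || aScanEccc ps, b || aScanEas ps) := by
    intro ps
    induction ps with
    | nil => intro a b; simp [aScanEccc, aScanEas]
    | cons p t ih =>
      intro a b
      simp only [List.foldl_cons, ih, aScanEccc, aScanEas]
      have hif : ∀ (c y : Bool), (if c = true then true else y) = (c || y) := by
        intro c y; cases c <;> simp
      simp only [hif, Bool.or_assoc, beq_iff_eq]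
      split <;> rename_i hc
      · simp [hc]
      · rw [beq_eq_false_iff_ne.mpr hc]; simp
  simpa using h params false false

theorem detect_alert_source_py_spec : Claim_equal_detect_alert_source_py := by
  intro params sender_name _
  unfold Spec_detect_alert_source_py detect_alert_source_py detect_alert_source_py_alt
  rw [bCollect_eq]
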